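-- pv_equiv track=rewrite | github.com/Ajay-Rajendrakumar/WebService | backend_python/python_backend.py | validMatrix
-- ===== SOURCE A (Python) =====
-- def validMatrix(string,order):
--     if len(getStringArray(string)) >= (order*order):
--         for c in string:
--             if c==' ' or (c>='0' and c<='9'):
--                 continue
--             else:
--                 return False
--         return True
--     else:
--         return False
--
-- def getStringArray(given_set):
--     split_value = []
--     tmp = ''
--     for c in given_set:
--         if c == ' ':
--             split_value.append((tmp))
--             tmp = ''
--         else:
--             tmp += c
--     if tmp != ' ':
--         split_value.append((tmp))
--     return split_value
-- ===== SOURCE B (Python) =====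
-- def validMatrix(string, order):
--     spaces = 0
--     valid = True
--     for c in string:
--         if c == ' ':
--             spaces += 1
--         elif '0' <= c <= '9':
--             pass
--         else:
--             valid = False
--     return valid and (spaces + 1 >= order * order)
-- ===== Notes on version B (the rewrite author's own statement) =====
-- stated objective: simpler
-- what changed: Replaced the two passes (building a split list with getStringArray just to take its length, then a second scan with early return) by one single scan maintaining a space count and a validity flag, using that getStringArray's length is always spaces+1.
import Mathlib
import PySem

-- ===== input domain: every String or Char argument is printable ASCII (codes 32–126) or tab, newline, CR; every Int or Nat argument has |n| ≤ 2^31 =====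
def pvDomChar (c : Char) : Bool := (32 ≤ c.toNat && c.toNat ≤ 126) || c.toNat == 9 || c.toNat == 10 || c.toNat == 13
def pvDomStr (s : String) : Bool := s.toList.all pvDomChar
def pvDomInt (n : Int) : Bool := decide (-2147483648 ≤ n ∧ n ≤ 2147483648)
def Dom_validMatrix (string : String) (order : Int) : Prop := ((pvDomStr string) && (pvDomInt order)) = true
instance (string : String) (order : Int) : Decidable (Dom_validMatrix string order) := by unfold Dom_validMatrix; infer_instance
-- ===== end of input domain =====

-- B replaces A's two passes (build a split list, take its length, then rescan with
-- early return) by a single scan keeping a space count and a validity flag; simpler.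

-- ===== PORT A =====
-- getStringArray's loop: state (split_value, tmp)
def gsaLoop : List Char → List String → String → List String
  | [], acc, tmp => if tmp ≠ " " then acc ++ [tmp] else acc
  | c :: cs, acc, tmp =>
      if c = ' ' then gsaLoop cs (acc ++ [tmp]) ""
      else gsaLoop cs acc (tmp.push c)

def getStringArray (given_set : String) : List String :=
  gsaLoop given_set.toList [] ""

-- A's for-loop with early 'return False'
def vmLoop : List Char → Bool
  | [] => true
  | c :: cs => if c = ' ' ∨ ('0' ≤ c ∧ c ≤ '9') then vmLoop cs else false

def validMatrix (string : String) (order : Int) : Bool :=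
  if ((getStringArray string).length : Int) ≥ order * order then
    vmLoop string.toList
  else
    false

-- ===== PORT B =====
def validMatrix_alt (string : String) (order : Int) : Bool :=
  let st := string.toList.foldl
    (fun (st : Int × Bool) c =>
      if c = ' ' then (st.1 + 1, st.2)
      else if '0' ≤ c ∧ c ≤ '9' then st
      else (st.1, false))
    (0, true)
  st.2 && decide (st.1 + 1 ≥ order * order)

-- ===== PRECONDITION & SPEC =====
def Spec_validMatrix (string : String) (order : Int) (out : Bool) : Prop := out = validMatrix_alt string order
instance (string : String) (order : Int) (out : Bool) : Decidable (Spec_validMatrix string order out) := by unfold Spec_validMatrix; infer_instance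

-- ===== CLAIM (what is proved, stated in full; the proofs are below) =====
def Claim_equal_validMatrix : Prop := ∀ (string : String) (order : Int), Dom_validMatrix string order → Spec_validMatrix string order (validMatrix string order)

-- ===== LEMMAS AND PROOFS =====

-- tmp never contains a space, so the final 'tmp ≠ " "' test always succeeds and
-- the split list's length is (number of spaces) + 1 + (segments already emitted).
theorem gsaLoop_length (cs : List Char) : ∀ (acc : List String) (tmp : String),
    ' ' ∉ tmp.toList →
    (gsaLoop cs acc tmp).length = acc.length + cs.count ' ' + 1 := by
  induction cs with
  | nil =>
      intro acc tmp h
      have htmp : tmp ≠ " " := by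
        intro he; subst he; simp at h
      simp [gsaLoop, htmp]
  | cons c cs ih =>
      intro acc tmp h
      by_cases hc : c = ' '
      · subst hc
        simp only [gsaLoop, if_true]
        rw [ih _ "" (by simp)]
        simp
        omega
      · simp only [gsaLoop, if_neg hc]
        rw [ih _ (tmp.push c) (by simp [String.toList_push, h, Ne.symm hc])]
        simp [hc]

theorem vmLoop_all (cs : List Char) :
    vmLoop cs = cs.all (fun c => c = ' ' || ('0' ≤ c && c ≤ '9')) := by
  induction cs with
  | nil => simp [vmLoop]
  | cons c cs ih =>
      by_cases hc : c = ' ' ∨ ('0' ≤ c ∧ c ≤ '9')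
      · simp [vmLoop, hc, ih]
      · simp [vmLoop, hc]

theorem altFold (cs : List Char) : ∀ (n : Int) (b : Bool),
    cs.foldl
      (fun (st : Int × Bool) c =>
        if c = ' ' then (st.1 + 1, st.2)
        else if '0' ≤ c ∧ c ≤ '9' then st
        else (st.1, false))
      (n, b)
    = (n + cs.count ' ', b && cs.all (fun c => c = ' ' || ('0' ≤ c && c ≤ '9'))) := by
  induction cs with
  | nil => intro n b; simp
  | cons c cs ih =>
      intro n b
      by_cases hc : c = ' '
      · subst hc
        simp only [List.foldl_cons, if_true]
        rw [ih]
        simp [List.count_cons]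
        omega
      · by_cases hd : '0' ≤ c ∧ c ≤ '9'
        · simp only [List.foldl_cons, if_neg hc, if_pos hd]
          rw [ih]
          simp [hc, hd.1, hd.2]
        · simp only [List.foldl_cons, if_neg hc, if_neg hd]
          rw [ih]
          simp [hc, hd]

-- ===== VERDICT (by name: the statement is the Claim_ definition above) =====
theorem validMatrix_spec : Claim_equal_validMatrix := by
  intro s o _
  unfold Spec_validMatrix validMatrix validMatrix_alt getStringArray
  rw [gsaLoop_length _ _ _ (by simp), altFold, vmLoop_all]
  simp only [List.length_nil, Nat.zero_add, Int.zero_add]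
  by_cases hlen : ((s.toList.count ' ' + 1 : Nat) : Int) ≥ o * o
  · have : ((s.toList.count ' ' : Nat) : Int) + 1 ≥ o * o := by push_cast at hlen ⊢; omega
    simp [this]
  · have : ¬ ((s.toList.count ' ' : Nat) : Int) + 1 ≥ o * o := by push_cast at hlen ⊢; omega
    simp [this]
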